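-- pv_equiv track=rewrite | github.com/cooljoseph1/bitnet | python/nn/forward.py | interweave
-- ===== SOURCE A (Python) =====
-- def successor(i, k, s):
--     return (i + k) % s
--
-- def predecessor(i, k, s):
--     return (i - k) % s
--
-- def adj(i, j, k, s):
--     if j%3 == 0:
--         return i
--     elif j%3 == 1:
--         return successor(i, k, s)
--     else:
--         return predecessor(i, k, s)
--
-- def interweave(x, w, trit):
--     k = 3 ** trit
--     s = len(x)
--
--     xor = [
--         [(x[adj(i,j,k,s)] ^ w[3*i+j]) for j in range(3)] for i in range(s)
--     ]
--     x = [(xori[0] + xori[1] + xori[2]) > 1 for xori in xor]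
--     maj = [
--         [xi ^ j for j in xori] for xi, xori in zip(x, xor)
--     ]
--
--     return x, maj
-- ===== SOURCE B (Python) =====
-- def interweave(x, w, trit):
--     s = len(x)
--     if s == 0:
--         return [], []
--     r = 3 ** trit % s
--     succ = x[r:] + x[:r]
--     pred = x[-r:] + x[:-r]
--     trips = [w[3 * i:3 * i + 3] for i in range(s)]
--     xor = [[u ^ t[0], v ^ t[1], p ^ t[2]]
--            for u, v, p, t in zip(x, succ, pred, trips)]
--     xs = [sum(row) > 1 for row in xor]
--     maj = [[xi ^ a for a in row] for xi, row in zip(xs, xor)]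
--     return xs, maj
-- ===== Notes on version B (the rewrite author's own statement) =====
-- stated objective: alternative
-- what changed: B replaces A's per-element modular adjacency indexing (adj/successor/predecessor computed inside a nested comprehension) by whole-list operations: two slice-built rotations of x for the successor/predecessor neighbours, weight triples cut out by slicing, and a single zip of the four lists; the majority test uses sum(row) instead of indexed access.
import Mathlib
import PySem

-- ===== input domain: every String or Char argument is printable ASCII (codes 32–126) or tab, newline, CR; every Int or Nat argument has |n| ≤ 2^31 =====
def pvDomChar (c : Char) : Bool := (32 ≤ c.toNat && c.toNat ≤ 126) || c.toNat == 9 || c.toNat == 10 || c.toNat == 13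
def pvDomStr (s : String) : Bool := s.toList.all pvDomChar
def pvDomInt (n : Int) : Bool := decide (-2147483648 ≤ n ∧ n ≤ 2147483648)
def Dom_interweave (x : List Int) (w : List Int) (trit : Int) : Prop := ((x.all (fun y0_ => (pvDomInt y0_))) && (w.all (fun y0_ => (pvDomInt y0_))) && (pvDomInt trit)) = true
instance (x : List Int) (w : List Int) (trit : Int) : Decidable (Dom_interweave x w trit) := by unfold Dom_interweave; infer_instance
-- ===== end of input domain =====

-- B replaces A's per-element modular adjacency indexing by whole-list rotations (slice
-- concatenations) of x and chunked weight triples combined with zip (alternative decomposition).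


-- ===== PORT A =====
-- Python bool ^ int: the bool is treated as 0/1 and XORed bitwise (result is an int)
def boolXorInt (b : Bool) (n : Int) : Int := PySem.Int.bxor (if b then 1 else 0) n

def pySuccessor (i k s : Int) : Int := PySem.Int.mod (i + k) s

def pyPredecessor (i k s : Int) : Int := PySem.Int.mod (i - k) s

def pyAdj (i j k s : Int) : Int :=
  if PySem.Int.mod j 3 = 0 then i
  else if PySem.Int.mod j 3 = 1 then pySuccessor i k s
  else pyPredecessor i k s

-- literal port of A; 3 ** trit is exact for trit ≥ 0 (for trit < 0 Python A raises TypeError, outside Pre_)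
def interweave (x : List Int) (w : List Int) (trit : Int) : List Bool × List (List Int) :=
  let k : Int := 3 ^ trit.toNat
  let s : Int := x.length
  let xor := (PySem.List.pyRange 0 s 1).map (fun i =>
    (PySem.List.pyRange 0 3 1).map (fun j =>
      PySem.Int.bxor (PySem.List.pyGetD x (pyAdj i j k s) 0) (PySem.List.pyGetD w (3 * i + j) 0)))
  let x' := xor.map (fun xori =>
    decide (PySem.List.pyGetD xori 0 0 + PySem.List.pyGetD xori 1 0 + PySem.List.pyGetD xori 2 0 > 1))
  let maj := (x'.zip xor).map (fun p => p.2.map (fun j => boolXorInt p.1 j))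
  (x', maj)

-- ===== PORT B =====
-- literal port of Source B: rotations of x as slice concatenations, weight triples by slicing,
-- then one zip of the four lists; no per-element index arithmetic
def interweave_alt (x : List Int) (w : List Int) (trit : Int) : List Bool × List (List Int) :=
  let s : Int := x.length
  if s = 0 then ([], [])
  else
    let r : Int := PySem.Int.mod (3 ^ trit.toNat) s
    let succ := PySem.List.slice x (some r) none ++ PySem.List.slice x none (some r)
    let pred := PySem.List.slice x (some (-r)) none ++ PySem.List.slice x none (some (-r))
    let trips := (PySem.List.pyRange 0 s 1).map (fun i =>
      PySem.List.slice w (some (3 * i)) (some (3 * i + 3)))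
    let xor := (x.zip (succ.zip (pred.zip trips))).map (fun q =>
      [PySem.Int.bxor q.1 (PySem.List.pyGetD q.2.2.2 0 0),
       PySem.Int.bxor q.2.1 (PySem.List.pyGetD q.2.2.2 1 0),
       PySem.Int.bxor q.2.2.1 (PySem.List.pyGetD q.2.2.2 2 0)])
    let xs := xor.map (fun row => decide (row.sum > 1))
    let maj := (xs.zip xor).map (fun p => p.2.map (fun a => boolXorInt p.1 a))
    (xs, maj)

-- ===== PRECONDITION & SPEC =====
-- Pre_ excludes exactly the inputs where A raises: for nonempty x, trit < 0 (3**trit is a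
-- float and indexing raises TypeError) or len(w) < 3*len(x) (IndexError on w[3*i+j]);
-- for x = [] no element is ever indexed and A returns ([], []).
def Pre_interweave (x : List Int) (w : List Int) (trit : Int) : Prop :=
  x = [] ∨ (0 ≤ trit ∧ 3 * x.length ≤ w.length)
instance (x : List Int) (w : List Int) (trit : Int) : Decidable (Pre_interweave x w trit) := by unfold Pre_interweave; infer_instance

def pvWitness_interweave : List Int × List Int × Int := ([1, 2, 3], [0, 1, 2, 3, 4, 5, 6, 7, 8], 1)

def Spec_interweave (x : List Int) (w : List Int) (trit : Int) (out : List Bool × List (List Int)) : Prop := out = interweave_alt x w trit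
instance (x : List Int) (w : List Int) (trit : Int) (out : List Bool × List (List Int)) : Decidable (Spec_interweave x w trit out) := by unfold Spec_interweave; infer_instance

-- ===== CLAIM (what is proved, stated in full; the proofs are below) =====
def Claim_equal_interweave : Prop := ∀ (x : List Int) (w : List Int) (trit : Int), Dom_interweave x w trit → Pre_interweave x w trit → Spec_interweave x w trit (interweave x w trit)

-- ===== LEMMAS AND PROOFS =====

-- index arithmetic: the successor adjacency index is a rotation index
theorem rot_idx_add (i L : Nat) (k : Int) (hL : 0 < L) :
    (((i : Int) + k) % (L : Int)).toNat = (i + ((k % (L : Int)).toNat)) % L := by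
  have hL' : (0 : Int) < L := by exact_mod_cast hL
  have hm0 : (0 : Int) ≤ k % L := Int.emod_nonneg k (by omega)
  have hcast : (((i + (k % (L : Int)).toNat) % L : Nat) : Int) = ((i : Int) + k % L) % L := by
    push_cast [Int.toNat_of_nonneg hm0]
    ring_nf
  have hsplit : ((i : Int) + k) % (L : Int) = ((i : Int) + k % L) % L := by
    conv_lhs => rw [Int.add_emod]
    conv_rhs => rw [Int.add_emod, Int.emod_emod_of_dvd k (dvd_refl (L : Int))]
  omega

-- index arithmetic: the predecessor adjacency index is the inverse rotation index
theorem rot_idx_sub (i L : Nat) (k : Int) (hL : 0 < L) :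
    (((i : Int) - k) % (L : Int)).toNat = (i + (L - (k % (L : Int)).toNat)) % L := by
  have hL' : (0 : Int) < L := by exact_mod_cast hL
  have hm0 : (0 : Int) ≤ k % L := Int.emod_nonneg k (by omega)
  have hmlt : k % (L : Int) < L := Int.emod_lt_of_pos k hL'
  have hmc : ((L - (k % (L : Int)).toNat : Nat) : Int) = (L : Int) - k % L := by omega
  have hcast : (((i + (L - (k % (L : Int)).toNat)) % L : Nat) : Int)
      = ((i : Int) + ((L : Int) - k % L)) % L := by
    push_cast [hmc]
    ring_nf
  have hsub : ((i : Int) - k) % (L : Int) = ((i : Int) + ((L : Int) - k % L)) % L := by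
    have h1 : ((i : Int) + ((L : Int) - k % L)) = ((i : Int) - k % L) + (L : Int) * 1 := by ring
    rw [h1, Int.add_mul_emod_self_left]
    conv_lhs => rw [Int.sub_emod]
    conv_rhs => rw [Int.sub_emod, Int.emod_emod_of_dvd k (dvd_refl (L : Int))]
  omega

-- the two xor tables coincide: A's modular-adjacency row i equals B's zip of the rotations
theorem xor_tables_eq (x w : List Int) (k : Int) (hx : 0 < x.length)
    (hw : 3 * x.length ≤ w.length) :
    (PySem.List.pyRange 0 (x.length : Int) 1).map (fun i =>
      (PySem.List.pyRange 0 3 1).map (fun j =>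
        PySem.Int.bxor (PySem.List.pyGetD x (pyAdj i j k (x.length : Int)) 0)
          (PySem.List.pyGetD w (3 * i + j) 0)))
    = (x.zip ((x.rotate (PySem.Int.mod k (x.length : Int)).toNat).zip
        ((x.rotate (x.length - (PySem.Int.mod k (x.length : Int)).toNat)).zip
          ((PySem.List.pyRange 0 (x.length : Int) 1).map (fun i =>
            PySem.List.slice w (some (3 * i)) (some (3 * i + 3))))))).map (fun q =>
      [PySem.Int.bxor q.1 (PySem.List.pyGetD q.2.2.2 0 0),
       PySem.Int.bxor q.2.1 (PySem.List.pyGetD q.2.2.2 1 0),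
       PySem.Int.bxor q.2.2.1 (PySem.List.pyGetD q.2.2.2 2 0)]) := by
  have hs : (0 : Int) < (x.length : Int) := by exact_mod_cast hx
  apply List.ext_getElem
  · simp [PySem.List.length_pyRange_one]
  · intro i h1 h2
    have hi : i < x.length := by
      simpa [PySem.List.length_pyRange_one] using h1
    have m0 : PySem.Int.mod (0 : Int) 3 = 0 := by decide
    have m1 : PySem.Int.mod (1 : Int) 3 = 1 := by decide
    have m2 : PySem.Int.mod (2 : Int) 3 = 2 := by decide
    have hr3 : PySem.List.pyRange 0 3 1 = [0, 1, 2] := by decide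
    simp only [List.getElem_map, PySem.List.getElem_pyRange_one, List.getElem_zip, zero_add,
      hr3, List.map_cons, List.map_nil]
    -- the weight triple at row i is the literal three-element list
    have htrip : PySem.List.slice w (some (3 * (i : Int))) (some (3 * (i : Int) + 3))
        = [w[3*i]'(by omega), w[3*i+1]'(by omega), w[3*i+2]'(by omega)] := by
      have hcast : (3 * (i : Int) : Int) = ((3 * i : Nat) : Int) := by push_cast; ring
      have hcast3 : (3 * (i : Int) + 3 : Int) = ((3 * i : Nat) : Int) + ((3 : Nat) : Int) := by
        push_cast; ring
      rw [hcast3, hcast, PySem.List.slice_natCast_add]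
      rw [List.drop_eq_getElem_cons (i := 3 * i) (l := w) (by omega),
        List.drop_eq_getElem_cons (i := 3 * i + 1) (l := w) (by omega),
        List.drop_eq_getElem_cons (i := 3 * i + 2) (l := w) (by omega)]
      rfl
    rw [htrip]
    have g0 : PySem.List.pyGetD [w[3*i]'(by omega), w[3*i+1]'(by omega), w[3*i+2]'(by omega)] 0 0 = w[3*i]'(by omega) := by
      simp [PySem.List.pyGetD, PySem.List.pyGet?, PySem.List.pyIdx?]
    have g1 : PySem.List.pyGetD [w[3*i]'(by omega), w[3*i+1]'(by omega), w[3*i+2]'(by omega)] 1 0 = w[3*i+1]'(by omega) := by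
      simp [PySem.List.pyGetD, PySem.List.pyGet?, PySem.List.pyIdx?]
    have g2 : PySem.List.pyGetD [w[3*i]'(by omega), w[3*i+1]'(by omega), w[3*i+2]'(by omega)] 2 0 = w[3*i+2]'(by omega) := by
      simp [PySem.List.pyGetD, PySem.List.pyGet?, PySem.List.pyIdx?]
    rw [g0, g1, g2]
    -- A's three adjacency indices
    have a0 : pyAdj (i : Int) 0 k (x.length : Int) = (i : Int) := by
      norm_num [pyAdj, m0]
    have a1 : pyAdj (i : Int) 1 k (x.length : Int)
        = PySem.Int.mod ((i : Int) + k) (x.length : Int) := by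
      norm_num [pyAdj, pySuccessor, m1]
    have a2 : pyAdj (i : Int) 2 k (x.length : Int)
        = PySem.Int.mod ((i : Int) - k) (x.length : Int) := by
      norm_num [pyAdj, pyPredecessor, m2]
    rw [a0, a1, a2]
    -- the three x components
    have c0 : PySem.List.pyGetD x ((i : Int)) 0 = x[i]'hi := by
      rw [PySem.List.pyGetD_eq_getElem x (i := (i : Int)) 0 (by omega) (by omega)]
      simp
    have c1 : PySem.List.pyGetD x (PySem.Int.mod ((i : Int) + k) (x.length : Int)) 0
        = (x.rotate (PySem.Int.mod k (x.length : Int)).toNat)[i]'(by simpa using hi) := by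
      rw [List.getElem_rotate]
      rw [PySem.List.pyGetD_eq_getElem x 0 (PySem.Int.mod_nonneg _ hs) (PySem.Int.mod_lt _ hs)]
      simp only [PySem.Int.mod_eq_emod_of_pos hs]
      simp only [rot_idx_add i x.length k hx]
    have c2 : PySem.List.pyGetD x (PySem.Int.mod ((i : Int) - k) (x.length : Int)) 0
        = (x.rotate (x.length - (PySem.Int.mod k (x.length : Int)).toNat))[i]'(by simpa using hi) := by
      rw [List.getElem_rotate]
      rw [PySem.List.pyGetD_eq_getElem x 0 (PySem.Int.mod_nonneg _ hs) (PySem.Int.mod_lt _ hs)]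
      simp only [PySem.Int.mod_eq_emod_of_pos hs]
      simp only [rot_idx_sub i x.length k hx]
    -- the three w components
    have d0 : PySem.List.pyGetD w (3 * (i : Int) + 0) 0 = w[3*i]'(by omega) := by
      rw [PySem.List.pyGetD_eq_getElem w (i := 3 * (i : Int) + 0) 0 (by omega) (by omega)]
      congr 1
    have d1 : PySem.List.pyGetD w (3 * (i : Int) + 1) 0 = w[3*i+1]'(by omega) := by
      rw [PySem.List.pyGetD_eq_getElem w (i := 3 * (i : Int) + 1) 0 (by omega) (by omega)]
      congr 1
    have d2 : PySem.List.pyGetD w (3 * (i : Int) + 2) 0 = w[3*i+2]'(by omega) := by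
      rw [PySem.List.pyGetD_eq_getElem w (i := 3 * (i : Int) + 2) 0 (by omega) (by omega)]
      congr 1
    rw [c0, c1, c2, d0, d1, d2]

-- ===== VERDICT (by name: the statement is the Claim_ definition above) =====
theorem interweave_spec : Claim_equal_interweave := by
  intro x w trit _ hpre
  unfold Spec_interweave Pre_interweave at *
  simp only [interweave, interweave_alt]
  rcases eq_or_ne x [] with hx | hx
  · subst hx
    simp [PySem.List.pyRange_one_eq_nil]
  have hlen : 0 < x.length := List.length_pos_of_ne_nil hx
  have hs : (0 : Int) < (x.length : Int) := by exact_mod_cast hlen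
  obtain ⟨-, hw⟩ := hpre.resolve_left hx
  rw [if_neg (by omega : ¬((x.length : Int) = 0))]
  set k : Int := 3 ^ trit.toNat with hk
  set r : Int := PySem.Int.mod k (x.length : Int) with hr
  have hr0 : 0 ≤ r := PySem.Int.mod_nonneg _ hs
  have hrlt : r < (x.length : Int) := PySem.Int.mod_lt _ hs
  have hrn : r.toNat ≤ x.length := by omega
  -- B's succ slice concatenation is a rotation
  have hsucc : PySem.List.slice x (some r) none ++ PySem.List.slice x none (some r)
      = x.rotate r.toNat := by
    rw [PySem.List.slice_from x hr0, PySem.List.slice_to x hr0,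
      List.rotate_eq_drop_append_take hrn]
  -- B's pred slice concatenation is the inverse rotation
  have hpred : PySem.List.slice x (some (-r)) none ++ PySem.List.slice x none (some (-r))
      = x.rotate (x.length - r.toNat) := by
    rcases eq_or_lt_of_le hr0 with h0 | hpos
    · rw [← h0]
      rw [neg_zero, PySem.List.slice_from x (le_refl (0 : Int)),
        PySem.List.slice_to x (le_refl (0 : Int))]
      simp [List.rotate_length]
    · have htn : 0 < r.toNat := by omega
      have hrc : r = ((r.toNat : Nat) : Int) := by omega
      rw [hrc, PySem.List.slice_from_neg_natCast x r.toNat htn,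
        PySem.List.slice_to_neg_natCast x r.toNat htn,
        List.rotate_eq_drop_append_take (Nat.sub_le _ _)]
      simp only [Int.toNat_natCast]
  have hxor := xor_tables_eq x w k hlen hw
  rw [← hr] at hxor
  rw [hsucc, hpred, ← hxor]
  -- remaining difference: the majority test (indexed entries in A, List.sum in B)
  have hmaj : ∀ row ∈ (PySem.List.pyRange 0 (x.length : Int) 1).map (fun i =>
      (PySem.List.pyRange 0 3 1).map (fun j =>
        PySem.Int.bxor (PySem.List.pyGetD x (pyAdj i j k (x.length : Int)) 0)
          (PySem.List.pyGetD w (3 * i + j) 0))),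
      decide (PySem.List.pyGetD row 0 0 + PySem.List.pyGetD row 1 0 + PySem.List.pyGetD row 2 0 > 1)
        = decide (row.sum > 1) := by
    intro row hrow
    obtain ⟨i, -, hrow⟩ := List.mem_map.mp hrow
    have hr3 : PySem.List.pyRange 0 3 1 = [0, 1, 2] := by decide
    subst hrow
    rw [hr3]
    simp [PySem.List.pyGetD, PySem.List.pyGet?, PySem.List.pyIdx?, add_assoc]
  rw [List.map_congr_left hmaj]
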